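-- pv_equiv track=rewrite | github.com/Approaching-AI/bfrl | demo/automation_poller/daily_notes_doc/daily_notes_doc_agents.py | collect_note_references
-- ===== SOURCE A (Python) =====
-- def collect_note_references(text: str) -> list[str]:
--     references: list[str] = []
--     marker = "]("
--     for line in text.splitlines():
--         start = 0
--         while True:
--             index = line.find(marker, start)
--             if index == -1:
--                 break
--             close_index = line.find(")", index + len(marker))
--             if close_index == -1:
--                 break
--             references.append(line[index + len(marker):close_index])
--             start = close_index + 1
--     return references
-- ===== SOURCE B (Python) =====
-- def collect_note_references(text: str) -> list[str]:
--     # Single left-to-right character state machine per line (no find/index jumps).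
--     references: list[str] = []
--     for line in text.splitlines():
--         collecting = False
--         prev_rb = False
--         buf: list[str] = []
--         for ch in line:
--             if collecting:
--                 if ch == ')':
--                     references.append(''.join(buf))
--                     collecting = False
--                     prev_rb = False
--                 else:
--                     buf.append(ch)
--             elif prev_rb and ch == '(':
--                 collecting = True
--                 buf = []
--             else:
--                 prev_rb = ch == ']'
--     return references
-- ===== Notes on version B (the rewrite author's own statement) =====
-- stated objective: alternative
-- what changed: Replaced the substring-find jump scan (locate the link marker, then the next close parenthesis, restart after it) with a single left-to-right per-character state machine per line that toggles between a searching state and a collecting state.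
import Mathlib
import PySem

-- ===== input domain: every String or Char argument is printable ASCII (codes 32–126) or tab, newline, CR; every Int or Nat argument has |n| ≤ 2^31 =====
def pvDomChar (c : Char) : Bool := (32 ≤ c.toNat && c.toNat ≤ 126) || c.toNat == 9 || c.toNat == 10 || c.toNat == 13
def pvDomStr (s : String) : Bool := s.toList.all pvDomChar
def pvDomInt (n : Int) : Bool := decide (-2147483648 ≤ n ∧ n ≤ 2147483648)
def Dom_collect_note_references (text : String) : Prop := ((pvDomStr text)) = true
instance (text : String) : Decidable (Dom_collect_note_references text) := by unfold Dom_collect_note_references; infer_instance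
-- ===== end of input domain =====

-- B replaces A's find-based jump-scan with a single per-character state machine per line (alternative, same cost).

-- ===== PORT A =====
-- A's inner 'while True' loop; fuel is only a termination device (line.length + 1 always suffices)
def pvALoop (line : String) (start : Nat) (fuel : Nat) : List String :=
  match fuel with
  | 0 => []
  | fuel + 1 =>
    let index := PySem.Str.findFrom line "](" (start : Int)
    if index = -1 then []
    else
      let close := PySem.Str.findFrom line ")" (index + 2)
      if close = -1 then []
      else PySem.Str.slice line (some (index + 2)) (some close) :: pvALoop line (close.toNat + 1) fuel

def collect_note_references (text : String) : List String :=
  (PySem.Str.splitlines text).foldl (fun references line => references ++ pvALoop line 0 (line.length + 1)) []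

-- ===== PORT B =====
-- state: (references, collecting, prev_rb, buf); ''.join over single chars is String.ofList (exact)
def pvBStep (st : List String × Bool × Bool × List Char) (ch : Char) : List String × Bool × Bool × List Char :=
  let (references, collecting, prevRb, buf) := st
  if collecting then
    if ch = ')' then (references ++ [String.ofList buf], false, false, buf)
    else (references, true, prevRb, buf ++ [ch])
  else if prevRb && ch = '(' then (references, true, prevRb, [])
  else (references, false, ch = ']', buf)

def collect_note_references_alt (text : String) : List String :=
  (PySem.Str.splitlines text).foldl
    (fun references line => (line.toList.foldl pvBStep (references, false, false, [])).1) []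

-- ===== PRECONDITION & SPEC =====
def Spec_collect_note_references (text : String) (out : List String) : Prop := out = collect_note_references_alt text
instance (text : String) (out : List String) : Decidable (Spec_collect_note_references text out) := by unfold Spec_collect_note_references; infer_instance

-- ===== CLAIM (what is proved, stated in full; the proofs are below) =====
def Claim_equal_collect_note_references : Prop := ∀ (text : String), Dom_collect_note_references text → Spec_collect_note_references text (collect_note_references text)

-- ===== LEMMAS AND PROOFS =====

-- B's per-line state machine as a plain recursion on the line's characters
def pvSM : List Char → Bool → Bool → List Char → List (List Char)
  | [], _, _, _ => []
  | c :: cs, true, p, buf => if c = ')' then buf :: pvSM cs false false buf else pvSM cs true p (buf ++ [c])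
  | c :: cs, false, p, buf => if p && c = '(' then pvSM cs true p [] else pvSM cs false (c = ']') buf

theorem pvB_fold_eq (l : List Char) : ∀ (refs : List String) (coll p : Bool) (buf : List Char),
    (l.foldl pvBStep (refs, coll, p, buf)).1 = refs ++ (pvSM l coll p buf).map String.ofList := by
  induction l with
  | nil => intro refs coll p buf; cases coll <;> simp [pvSM]
  | cons c cs ih =>
    intro refs coll p buf
    cases coll with
    | true => by_cases h : c = ')' <;> simp [pvBStep, pvSM, h, ih]
    | false => by_cases h : (p && decide (c = '(')) = true <;> simp [pvBStep, pvSM, h, ih]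

theorem pvSM_noTrigger (l : List Char) : ∀ (p : Bool) (buf : List Char),
    ¬ [']', '('] <:+: l → (p = true → l.head? ≠ some '(') → pvSM l false p buf = [] := by
  induction l with
  | nil => intro p buf _ _; simp [pvSM]
  | cons c cs ih =>
    intro p buf hinf hp
    have hne : ¬ (p && decide (c = '(')) = true := by
      intro h
      simp only [Bool.and_eq_true, decide_eq_true_eq] at h
      exact hp h.1 (by simp [h.2])
    simp only [pvSM, if_neg hne]
    apply ih
    · exact fun h => hinf (h.trans (List.suffix_cons c cs).isInfix)
    · intro hc hhd
      have hc' : c = ']' := by simpa using hc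
      cases cs with
      | nil => simp at hhd
      | cons d ds =>
        have hd : d = '(' := by simpa using hhd
        exact hinf ⟨[], ds, by simp [hc', hd]⟩

theorem pvSM_collect_none (b : List Char) : ∀ (p : Bool) (buf : List Char),
    ')' ∉ b → pvSM b true p buf = [] := by
  induction b with
  | nil => intro p buf _; simp [pvSM]
  | cons c cs ih =>
    intro p buf h
    have hc : ¬ c = ')' := fun hh => h (hh ▸ List.mem_cons_self ..)
    simp only [pvSM, if_neg hc]
    exact ih p (buf ++ [c]) (fun hm => h (List.mem_cons_of_mem _ hm))

theorem pvSM_consume_collect (b : List Char) : ∀ (r : List Char) (p : Bool) (buf : List Char),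
    ')' ∉ b → pvSM (b ++ ')' :: r) true p buf = (buf ++ b) :: pvSM r false false (buf ++ b) := by
  induction b with
  | nil => intro r p buf _; simp [pvSM]
  | cons c cs ih =>
    intro r p buf h
    have hc : ¬ c = ')' := fun hh => h (hh ▸ List.mem_cons_self ..)
    simp only [List.cons_append, pvSM, if_neg hc]
    rw [ih r p (buf ++ [c]) (fun hm => h (List.mem_cons_of_mem _ hm))]
    simp

theorem pvSM_consume_search (a : List Char) : ∀ (r : List Char) (p : Bool) (buf : List Char),
    ¬ [']', '('] <:+: a → (p = true → a.head? ≠ some '(') →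
    pvSM (a ++ ']' :: '(' :: r) false p buf = pvSM r true true [] := by
  induction a with
  | nil => intro r p buf _ _; simp [pvSM]
  | cons c cs ih =>
    intro r p buf hinf hp
    have hne : ¬ (p && decide (c = '(')) = true := by
      intro h
      simp only [Bool.and_eq_true, decide_eq_true_eq] at h
      exact hp h.1 (by simp [h.2])
    simp only [List.cons_append, pvSM, if_neg hne]
    apply ih
    · exact fun h => hinf (h.trans (List.suffix_cons c cs).isInfix)
    · intro hc hhd
      have hc' : c = ']' := by simpa using hc
      cases cs with
      | nil => simp at hhd
      | cons d ds =>
        have hd : d = '(' := by simpa using hhd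
        exact hinf ⟨[], ds, by simp [hc', hd]⟩

-- an infix occurrence of sub inside a take-prefix of l.drop k is a prefix occurrence of l at some k + j
theorem pvInfix_take_drop (l sub : List Char) (k m j : Nat) (hs : 0 < sub.length)
    (hj : sub <+: (((l.drop k).take m).drop j)) :
    sub <+: l.drop (k + j) ∧ sub.length + j ≤ m := by
  rw [List.drop_take] at hj
  constructor
  · have := hj.trans (List.take_prefix _ _)
    rwa [List.drop_drop] at this
  · have h1 := hj.length_le
    have h2 : (((l.drop k).drop j).take (m - j)).length ≤ m - j := by
      simp [List.length_take]
    omega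

theorem pvA_loop_eq (line : String) : ∀ (fuel k : Nat) (buf : List Char),
    k ≤ line.toList.length → line.toList.length - k < fuel →
    pvALoop line k fuel = (pvSM (line.toList.drop k) false false buf).map String.ofList := by
  intro fuel
  induction fuel with
  | zero => intro k buf hk h; omega
  | succ fuel ih =>
    intro k buf hk hfuel
    have hLL : line.toList.length = line.length := String.length_toList
    have hsub : ("](" : String).toList = [']', '('] := by decide
    have hclo : (")" : String).toList = [')'] := by decide
    simp only [pvALoop, PySem.Str.findFrom_eq, hsub, hclo]
    by_cases h1 : PySem.Chars.findFrom line.toList [']', '('] (k : Int) = -1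
    · rw [if_pos h1]
      have hni : ¬ [']', '('] <:+: (line.toList.drop k) :=
        (PySem.Chars.findFrom_natCast_eq_neg_one_iff _ _ k hk).mp h1
      rw [pvSM_noTrigger _ _ _ hni (by simp)]
      simp
    · rw [if_neg h1]
      obtain ⟨hki, hpre, hmin⟩ := PySem.Chars.findFrom_natCast_spec line.toList [']', '('] k hk h1
      set i := PySem.Chars.findFrom line.toList [']', '('] (k : Int) with hidef
      have hi0 : (0 : Int) ≤ i := le_trans (Int.natCast_nonneg k) hki
      have hkle : k ≤ i.toNat := by omega
      obtain ⟨t, ht⟩ := hpre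
      have htlen : i.toNat + 2 ≤ line.toList.length := by
        have hlen := congrArg List.length ht
        simp [List.length_drop] at hlen
        omega
      have ht2 : line.toList.drop (i.toNat + 2) = t := by
        have h := congrArg (List.drop 2) ht
        rw [List.drop_drop] at h
        simpa using h.symm
      have hkdec : line.toList.drop k = (line.toList.drop k).take (i.toNat - k) ++ (']' :: '(' :: t) := by
        conv_lhs => rw [← List.take_append_drop (i.toNat - k) (line.toList.drop k)]
        congr 1
        rw [List.drop_drop]
        have hik : k + (i.toNat - k) = i.toNat := by omega
        rw [hik, ← ht]
        simp
      have hna : ¬ [']', '('] <:+: (line.toList.drop k).take (i.toNat - k) := by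
        intro hinf
        obtain ⟨j, hj⟩ := (PySem.Chars.exists_prefix_drop_iff_isIn _ _).mpr
          ((PySem.Chars.isIn_iff_infix _ _).mpr hinf)
        obtain ⟨hj1, hj2⟩ := pvInfix_take_drop line.toList [']', '('] k (i.toNat - k) j (by simp) hj
        exact hmin (k + j) (by omega) (by simp at hj2; omega) hj1
      have hcast : i + 2 = ((i.toNat + 2 : Nat) : Int) := by omega
      rw [hcast]
      by_cases h2 : PySem.Chars.findFrom line.toList [')'] ((i.toNat + 2 : Nat) : Int) = -1
      · rw [if_pos h2]
        have hno : ¬ [')'] <:+: line.toList.drop (i.toNat + 2) :=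
          (PySem.Chars.findFrom_natCast_eq_neg_one_iff _ _ (i.toNat + 2) htlen).mp h2
        rw [ht2] at hno
        have hnp : ')' ∉ t := fun hm => hno ((List.singleton_infix_iff _ _).mpr hm)
        rw [hkdec, pvSM_consume_search _ _ _ _ hna (by simp), pvSM_collect_none _ _ _ hnp]
        simp
      · rw [if_neg h2]
        obtain ⟨hc1, hc2, hc3⟩ := PySem.Chars.findFrom_natCast_spec line.toList [')'] (i.toNat + 2) htlen h2
        set cl := PySem.Chars.findFrom line.toList [')'] ((i.toNat + 2 : Nat) : Int) with hcldef
        have hcl0 : (0 : Int) ≤ cl := le_trans (Int.natCast_nonneg _) hc1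
        have hcle : i.toNat + 2 ≤ cl.toNat := by omega
        obtain ⟨r', hr⟩ := hc2
        have hclen : cl.toNat < line.toList.length := by
          have hlen := congrArg List.length hr
          simp [List.length_drop] at hlen
          omega
        have hr2 : line.toList.drop (cl.toNat + 1) = r' := by
          have h := congrArg (List.drop 1) hr
          rw [List.drop_drop] at h
          simpa using h.symm
        have htb : t = (line.toList.drop (i.toNat + 2)).take (cl.toNat - (i.toNat + 2)) ++
            ')' :: line.toList.drop (cl.toNat + 1) := by
          rw [← ht2]
          conv_lhs => rw [← List.take_append_drop (cl.toNat - (i.toNat + 2)) (line.toList.drop (i.toNat + 2))]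
          congr 1
          rw [List.drop_drop]
          have hcc : i.toNat + 2 + (cl.toNat - (i.toNat + 2)) = cl.toNat := by omega
          rw [hcc, ← hr, hr2]
          simp
        have hnb : ')' ∉ (line.toList.drop (i.toNat + 2)).take (cl.toNat - (i.toNat + 2)) := by
          intro hm
          obtain ⟨j, hj⟩ := (PySem.Chars.exists_prefix_drop_iff_isIn _ _).mpr
            ((PySem.Chars.isIn_iff_infix _ _).mpr ((List.singleton_infix_iff _ _).mpr hm))
          obtain ⟨hj1, hj2⟩ := pvInfix_take_drop line.toList [')'] (i.toNat + 2) (cl.toNat - (i.toNat + 2)) j (by simp) hj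
          exact hc3 (i.toNat + 2 + j) (by omega) (by simp at hj2; omega) hj1
        have hslice : PySem.Str.slice line (some ((i.toNat + 2 : Nat) : Int)) (some cl) =
            String.ofList ((line.toList.drop (i.toNat + 2)).take (cl.toNat - (i.toNat + 2))) := by
          have hcl' : cl = ((cl.toNat : Nat) : Int) := by omega
          have htl : (PySem.Str.slice line (some ((i.toNat + 2 : Nat) : Int)) (some cl)).toList =
              (line.toList.drop (i.toNat + 2)).take (cl.toNat - (i.toNat + 2)) := by
            rw [PySem.Str.toList_slice, PySem.Chars.slice_eq_listSlice, hcl',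
              PySem.List.slice_natCast]
            simp only [Int.toNat_natCast]
          have h := congrArg String.ofList htl
          rwa [String.ofList_toList] at h
        rw [hkdec, pvSM_consume_search _ _ _ _ hna (by simp), htb, pvSM_consume_collect _ _ _ _ hnb,
          hslice, ih (cl.toNat + 1) ((line.toList.drop (i.toNat + 2)).take (cl.toNat - (i.toNat + 2)))
            (by omega) (by omega)]
        simp

theorem pvLine_eq (line : String) (refs : List String) :
    refs ++ pvALoop line 0 (line.length + 1) = (line.toList.foldl pvBStep (refs, false, false, [])).1 := by
  have hlen : line.toList.length = line.length := String.length_toList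
  rw [pvB_fold_eq, pvA_loop_eq line (line.length + 1) 0 [] (Nat.zero_le _) (by omega)]
  simp

theorem pvFold_eq (lines : List String) : ∀ refs : List String,
    lines.foldl (fun references line => references ++ pvALoop line 0 (line.length + 1)) refs
      = lines.foldl (fun references line => (line.toList.foldl pvBStep (references, false, false, [])).1) refs := by
  induction lines with
  | nil => intro refs; rfl
  | cons l ls ih =>
    intro refs
    simp only [List.foldl_cons]
    rw [pvLine_eq l refs]
    exact ih _

-- ===== VERDICT (by name: the statement is the Claim_ definition above) =====
theorem collect_note_references_spec : Claim_equal_collect_note_references := by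
  intro text _
  unfold Spec_collect_note_references collect_note_references collect_note_references_alt
  exact pvFold_eq _ []
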